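-- pv_equiv track=rewrite | github.com/morpheus65535/bazarr | libs/dumprar.py | render_flags
-- ===== SOURCE A (Python) =====
-- def render_flags(flags, bit_list):
--     """Show bit names.
--     """
--     res = []
--     known = 0
--     for bit in bit_list:
--         known = known | bit[0]
--         if flags & bit[0]:
--             res.append(bit[1])
--     unknown = flags & ~known
--     n = 0
--     while unknown:
--         if unknown & 1:
--             res.append("UNK_%04x" % (1 << n))
--         unknown = unknown >> 1
--         n += 1
--
--     if not res:
--         return '-'
--
--     return ",".join(res)
-- ===== SOURCE B (Python) =====
-- def render_flags(flags, bit_list):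
--     """Show bit names.
--     """
--     names = [name for mask, name in bit_list if flags & mask]
--     known = 0
--     for mask, _ in bit_list:
--         known |= mask
--     unknown = flags & ~known
--     while unknown:
--         lower = unknown & (unknown - 1)   # clear the lowest set bit
--         names.append("UNK_%04x" % (unknown - lower))
--         unknown = lower
--     return ",".join(names) if names else '-'
-- ===== Notes on version B (the rewrite author's own statement) =====
-- stated objective: alternative
-- what changed: Phase 1 becomes a filter comprehension for the names plus a separate OR accumulation for known (instead of one interleaved loop), and phase 2 iterates only over the set bits of unknown with Kernighan's trick unknown & (unknown - 1) (formatting unknown - lower directly) instead of shifting through every bit position with a counter.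
import Mathlib
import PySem

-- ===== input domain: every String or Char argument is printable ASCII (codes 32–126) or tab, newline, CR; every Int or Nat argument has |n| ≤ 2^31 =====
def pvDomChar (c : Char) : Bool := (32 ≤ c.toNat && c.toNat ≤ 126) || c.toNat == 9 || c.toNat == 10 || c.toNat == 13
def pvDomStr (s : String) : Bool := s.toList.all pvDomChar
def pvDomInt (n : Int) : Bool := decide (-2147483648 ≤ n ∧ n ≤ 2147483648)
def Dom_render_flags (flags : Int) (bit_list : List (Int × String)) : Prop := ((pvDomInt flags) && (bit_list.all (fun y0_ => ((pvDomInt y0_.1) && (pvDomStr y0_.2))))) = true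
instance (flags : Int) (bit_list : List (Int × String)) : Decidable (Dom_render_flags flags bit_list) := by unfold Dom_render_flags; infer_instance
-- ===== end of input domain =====

-- B replaces A's interleaved name/known loop by a filter comprehension plus a separate OR pass,
-- and A's per-bit-position shift scan by a set-bit (Kernighan) iteration; equal return values on Pre_ (alternative decomposition, no speed claim).

-- ===== PORT A =====

-- "UNK_%04x" % v  for v ≥ 0 (both Pythons only format positive ints): lowercase hex, zero-padded to width 4
def unkName (v : Nat) : String :=
  let ds := Nat.toDigits 16 v
  String.ofList (['U', 'N', 'K', '_'] ++ List.replicate (4 - ds.length) '0' ++ ds)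

-- A's 'while unknown:' loop; the 'unknown ≤ 0' guard makes it total (Python never returns when unknown < 0;
-- the ports still agree there, since B's loop carries the same guard)
def renderLoopA (unknown : Int) (n : Nat) (res : List String) : List String :=
  if unknown ≤ 0 then res
  else renderLoopA (unknown >>> 1) (n + 1)
        (if PySem.Int.band unknown 1 ≠ 0 then res ++ [unkName (1 <<< n)] else res)
termination_by unknown.toNat
decreasing_by
  rename_i h
  obtain ⟨m, rfl⟩ : ∃ m : Nat, unknown = (m : Int) :=
    ⟨unknown.toNat, (Int.toNat_of_nonneg (by omega)).symm⟩
  have : ((m : Int) >>> 1) = ((m >>> 1 : Nat) : Int) := rfl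
  rw [this]
  simp only [Int.toNat_natCast]
  have : m >>> 1 = m / 2 := Nat.shiftRight_one m
  omega

def render_flags (flags : Int) (bit_list : List (Int × String)) : String :=
  let p := bit_list.foldl
    (fun (acc : List String × Int) bit =>
      (if PySem.Int.band flags bit.1 ≠ 0 then acc.1 ++ [bit.2] else acc.1,
       PySem.Int.bor acc.2 bit.1)) ([], 0)
  let unknown := PySem.Int.band flags (Int.not p.2)
  let res := renderLoopA unknown 0 p.1
  if res = [] then "-" else PySem.Str.join "," res

-- ===== PORT B =====

-- B's 'while unknown:' Kernighan loop; same totality guard as renderLoopA (Python B diverges on negative unknown too)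
def renderLoopB (unknown : Int) (names : List String) : List String :=
  if unknown ≤ 0 then names
  else
    let lower := PySem.Int.band unknown (unknown - 1)
    renderLoopB lower (names ++ [unkName (unknown - lower).toNat])
termination_by unknown.toNat
decreasing_by
  rename_i h
  obtain ⟨m, rfl⟩ : ∃ m : Nat, unknown = (m : Int) :=
    ⟨unknown.toNat, (Int.toNat_of_nonneg (by omega)).symm⟩
  have : ((m : Int) - 1) = ((m - 1 : Nat) : Int) := by omega
  rw [this, PySem.Int.band_natCast]
  simp only [Int.toNat_natCast]
  have := Nat.and_le_right (n := m) (m := m - 1)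
  omega

def render_flags_alt (flags : Int) (bit_list : List (Int × String)) : String :=
  let names := (bit_list.filter (fun b => PySem.Int.band flags b.1 != 0)).map Prod.snd
  let known := bit_list.foldl (fun k b => PySem.Int.bor k b.1) 0
  let names := renderLoopB (PySem.Int.band flags (Int.not known)) names
  if names = [] then "-" else PySem.Str.join "," names

-- ===== PRECONDITION & SPEC =====

def Spec_render_flags (flags : Int) (bit_list : List (Int × String)) (out : String) : Prop := out = render_flags_alt flags bit_list
instance (flags : Int) (bit_list : List (Int × String)) (out : String) : Decidable (Spec_render_flags flags bit_list out) := by unfold Spec_render_flags; infer_instance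

-- ===== CLAIM (what is proved, stated in full; the proofs are below) =====
def Claim_equal_render_flags : Prop := ∀ (flags : Int) (bit_list : List (Int × String)), Dom_render_flags flags bit_list → Spec_render_flags flags bit_list (render_flags flags bit_list)

-- ===== LEMMAS AND PROOFS =====

-- Nat bit facts used to relate the two loops
theorem pvLandOdd (a : Nat) : (2*a+1) &&& (2*a) = 2*a := by
  have h := @Nat.bitwise_bit and (by rfl) true a false a
  have e : ∀ x y : Nat, x &&& y = Nat.bitwise and x y := fun _ _ => rfl
  simp only [Nat.bit, cond, Bool.and_false] at h
  have hs : Nat.bitwise and a a = a := by rw [← e, Nat.and_self]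
  rw [e]; omega

theorem pvLandEven (v : Nat) (hv : 0 < v) : (2*v) &&& (2*v-1) = 2*(v &&& (v-1)) := by
  have h := @Nat.bitwise_bit and (by rfl) false v true (v-1)
  have e : ∀ x y : Nat, x &&& y = Nat.bitwise and x y := fun _ _ => rfl
  simp only [Nat.bit, cond, Bool.false_and] at h
  rw [show 2*v-1 = 2*(v-1)+1 from by omega, e, e]; omega

-- the common specification of both phase-2 loops: UNK names of the set bits of u, ascending, s = value of the lowest position
def unkList (u s : Nat) : List String :=
  if u = 0 then [] else (if u % 2 = 1 then [unkName s] else []) ++ unkList (u / 2) (2 * s)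
termination_by u
decreasing_by exact Nat.div_lt_self (by omega) (by omega)

theorem unkList_double (a s : Nat) : unkList (2*a) s = unkList a (2*s) := by
  rw [unkList]
  by_cases h : a = 0
  · subst h; simp [unkList]
  · have h2 : ¬ (2*a = 0) := by omega
    simp only [if_neg h2, show (2*a) % 2 = 0 from by omega, show (2*a)/2 = a from by omega]
    simp

theorem unkList_odd (a s : Nat) : unkList (2*a+1) s = unkName s :: unkList a (2*s) := by
  rw [unkList]
  simp [show (2*a+1) % 2 = 1 from by omega, show (2*a+1)/2 = a from by omega]

-- Kernighan's step seen by the specification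
theorem unkList_kernighan (u : Nat) (hu : 0 < u) :
    ∀ s, unkList u s = unkName (s * (u - (u &&& (u-1)))) :: unkList (u &&& (u-1)) s := by
  induction u using Nat.strong_induction_on with
  | _ u ih =>
    intro s
    rcases Nat.even_or_odd u with ⟨v, hv⟩ | ⟨a, ha⟩
    · -- u = 2v, v > 0
      have hv' : u = 2*v := by omega
      have hv0 : 0 < v := by omega
      subst hv'
      have hw : (2*v) &&& (2*v-1) = 2*(v &&& (v-1)) := pvLandEven v hv0
      have hle : v &&& (v-1) ≤ v - 1 := Nat.and_le_right
      rw [hw, unkList_double, ih v (by omega) hv0 (2*s), unkList_double]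
      have : (2*s) * (v - (v &&& (v-1))) = s * (2*v - 2*(v &&& (v-1))) := by
        rw [Nat.mul_sub, Nat.mul_sub]; ring_nf
      rw [this]
    · -- u = 2a+1
      subst ha
      have hw : (2*a+1) &&& (2*a+1-1) = 2*a := by
        rw [show 2*a+1-1 = 2*a from by omega]; exact pvLandOdd a
      rw [hw, unkList_odd, unkList_double]
      simp [show 2*a+1 - 2*a = 1 from by omega]

-- loop A computes the specification (1 <<< n = value of position n)
theorem renderLoopA_spec (u : Nat) : ∀ (n : Nat) (res : List String),
    renderLoopA (u : Int) n res = res ++ unkList u (1 <<< n) := by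
  induction u using Nat.strong_induction_on with
  | _ u ih =>
    intro n res
    rw [renderLoopA]
    by_cases h : u = 0
    · subst h; simp [unkList]
    · have hnle : ¬ ((u : Int) ≤ 0) := by omega
      rw [if_neg hnle]
      have hsh : ((u : Int) >>> 1) = ((u / 2 : Nat) : Int) := by
        show ((u >>> 1 : Nat) : Int) = _
        rw [Nat.shiftRight_one]
      have hb : PySem.Int.band (u : Int) 1 = ((u &&& 1 : Nat) : Int) := by
        exact_mod_cast PySem.Int.band_natCast u 1
      rw [hsh, hb, ih (u / 2) (Nat.div_lt_self (by omega) (by omega))]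
      conv_rhs => rw [unkList]
      rw [if_neg h, show 2 * (1 <<< n) = 1 <<< (n+1) from by
        simp [Nat.shiftLeft_eq]; ring]
      rw [Nat.and_one_is_mod]
      by_cases hp : u % 2 = 1
      · rw [if_pos (show ((u % 2 : Nat) : Int) ≠ 0 from by omega), if_pos hp]; simp
      · rw [if_neg (show ¬ ((u % 2 : Nat) : Int) ≠ 0 from by omega), if_neg hp]; simp

-- loop B computes the same specification
theorem renderLoopB_spec (u : Nat) : ∀ (names : List String),
    renderLoopB (u : Int) names = names ++ unkList u 1 := by
  induction u using Nat.strong_induction_on with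
  | _ u ih =>
    intro names
    rw [renderLoopB]
    by_cases h : u = 0
    · subst h; simp [unkList]
    · have hnle : ¬ ((u : Int) ≤ 0) := by omega
      rw [if_neg hnle]
      have hcast : ((u : Int) - 1) = ((u - 1 : Nat) : Int) := by omega
      have hb : PySem.Int.band (u : Int) ((u : Int) - 1) = ((u &&& (u-1) : Nat) : Int) := by
        rw [hcast]; exact PySem.Int.band_natCast u (u-1)
      have hle : u &&& (u-1) ≤ u - 1 := Nat.and_le_right
      have hsub : ((u : Int) - ((u &&& (u-1) : Nat) : Int)).toNat = u - (u &&& (u-1)) := by omega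
      simp only [hb, hsub]
      rw [ih (u &&& (u-1)) (by omega)]
      rw [unkList_kernighan u (by omega) 1]
      simp

-- both loops agree from ANY integer (for negative start both return the accumulator at once)
theorem loops_agree (u : Int) (res : List String) :
    renderLoopA u 0 res = renderLoopB u res := by
  by_cases h : u ≤ 0
  · rw [renderLoopA, renderLoopB, if_pos h, if_pos h]
  · obtain ⟨m, rfl⟩ : ∃ m : Nat, u = (m : Int) :=
      ⟨u.toNat, (Int.toNat_of_nonneg (by omega)).symm⟩
    rw [renderLoopA_spec, renderLoopB_spec]
    norm_num

-- phase 1: A's single fold equals B's filter-map plus OR fold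
theorem phase1_fold (flags : Int) (bl : List (Int × String)) :
    ∀ (res : List String) (k : Int),
    bl.foldl (fun (acc : List String × Int) bit =>
      (if PySem.Int.band flags bit.1 ≠ 0 then acc.1 ++ [bit.2] else acc.1,
       PySem.Int.bor acc.2 bit.1)) (res, k)
    = (res ++ (bl.filter (fun b => PySem.Int.band flags b.1 != 0)).map Prod.snd,
       bl.foldl (fun k b => PySem.Int.bor k b.1) k) := by
  induction bl with
  | nil => intro res k; simp
  | cons b bl ih =>
    intro res k
    simp only [List.foldl_cons, List.filter_cons, ih]
    by_cases h : PySem.Int.band flags b.1 ≠ 0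
    · simp [h]
    · simp only [ne_eq, not_not] at h
      simp [h]

-- ===== VERDICT (by name: the statement is the Claim_ definition above) =====
theorem render_flags_spec : Claim_equal_render_flags := by
  intro flags bit_list _
  unfold Spec_render_flags render_flags render_flags_alt
  rw [phase1_fold flags bit_list [] 0]
  simp only [List.nil_append]
  rw [loops_agree]
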